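-- pv_equiv track=rewrite | github.com/WJmodels/CRMNet | MMLAB/mmsegmentation/my_MMLAB_tools/file_operation/generate_certain_number_sub_dataset/split_dataset.py | get_max_interval_indices
-- ===== SOURCE A (Python) =====
-- def get_max_interval_indices(total_files, num_files_to_copy):
--     """
--     获取最大间隔索引列表。
--
--     参数:
--     - total_files: int, 总文件数
--     - num_files_to_copy: int, 需要复制的文件数
--
--     返回值:
--     - List[int], 索引列表
--     """
--     if num_files_to_copy >= total_files:
--         return list(range(total_files))
--     if num_files_to_copy == 1:
--         return [0]
--
--     indices = [0, total_files - 1]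
--     for _ in range(num_files_to_copy - 2):
--         max_gap = 0
--         insert_idx = 1
--         for i in range(1, len(indices)):
--             gap = indices[i] - indices[i-1]
--             if gap > max_gap:
--                 max_gap = gap
--                 insert_idx = i
--         indices.insert(insert_idx, (indices[insert_idx-1] + indices[insert_idx]) // 2)
--
--     return indices
-- ===== SOURCE B (Python) =====
-- def get_max_interval_indices(total_files, num_files_to_copy):
--     if num_files_to_copy >= total_files:
--         return list(range(total_files))
--     if num_files_to_copy == 1:
--         return [0]
--     # work on the list of gap lengths instead of the index list: splitting a gap
--     # depends only on its length, and the indices are recovered by one prefix-sum pass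
--     gaps = [total_files - 1]
--     for _ in range(num_files_to_copy - 2):
--         g = max(gaps)
--         i = gaps.index(g)
--         gaps[i:i + 1] = [g // 2, g - g // 2]
--     indices = [0]
--     acc = 0
--     for g in gaps:
--         acc += g
--         indices.append(acc)
--     return indices
-- ===== Notes on version B (the rewrite author's own statement) =====
-- stated objective: alternative
-- what changed: B maintains the list of gap lengths (splitting the first maximal gap in place via max/index and a slice assignment) and reconstructs the index list by a single final prefix-sum pass, instead of A's maintaining the sorted index list and re-deriving every gap by a manual scan on each iteration.
import Mathlib
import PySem

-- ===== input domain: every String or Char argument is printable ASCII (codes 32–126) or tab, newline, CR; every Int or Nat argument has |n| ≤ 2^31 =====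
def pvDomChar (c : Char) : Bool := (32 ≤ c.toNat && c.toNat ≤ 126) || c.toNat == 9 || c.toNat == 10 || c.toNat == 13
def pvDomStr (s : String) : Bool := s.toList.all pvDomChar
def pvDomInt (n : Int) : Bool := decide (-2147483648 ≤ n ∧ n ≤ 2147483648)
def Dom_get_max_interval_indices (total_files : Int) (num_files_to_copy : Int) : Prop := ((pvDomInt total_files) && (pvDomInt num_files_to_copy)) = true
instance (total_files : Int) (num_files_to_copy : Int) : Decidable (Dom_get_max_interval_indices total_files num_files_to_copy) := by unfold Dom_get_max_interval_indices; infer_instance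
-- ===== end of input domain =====

-- B maintains the gap lengths (split first maximal gap in place, prefix-sum once at the end) instead of A's index list with a rescan per round; alternative structure, no speed claim.

-- ===== PORT A =====
-- inner 'for i in range(1, len(indices))' scan computing (max_gap, insert_idx)
def pvAScan (indices : List Int) : Int × Int :=
  (PySem.List.pyRange 1 (indices.length : Int) 1).foldl
    (fun st i =>
      let gap := PySem.List.pyGetD indices i 0 - PySem.List.pyGetD indices (i - 1) 0
      if gap > st.1 then (gap, i) else st)
    (0, 1)

-- one body of A's outer loop: scan, then indices.insert(insert_idx, (indices[insert_idx-1]+indices[insert_idx])//2)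
def pvAStep (indices : List Int) : List Int :=
  let st := pvAScan indices
  PySem.List.insert indices st.2
    (PySem.Int.floordiv (PySem.List.pyGetD indices (st.2 - 1) 0 + PySem.List.pyGetD indices st.2 0) 2)

def get_max_interval_indices (total_files : Int) (num_files_to_copy : Int) : List Int :=
  if num_files_to_copy ≥ total_files then PySem.List.pyRange 0 total_files 1
  else if num_files_to_copy = 1 then [0]
  else
    (PySem.List.pyRange 0 (num_files_to_copy - 2) 1).foldl
      (fun indices _ => pvAStep indices) [0, total_files - 1]

-- ===== PORT B =====
-- one body of B's loop: g = max(gaps); i = gaps.index(g); gaps[i:i+1] = [g//2, g - g//2]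
def pvBStep (gaps : List Int) : List Int :=
  let g := (PySem.List.max? gaps (fun x => x)).getD 0
  let i := (PySem.List.index? gaps g).getD 0
  gaps.take i ++ PySem.Int.floordiv g 2 :: (g - PySem.Int.floordiv g 2) :: gaps.drop (i + 1)

def get_max_interval_indices_alt (total_files : Int) (num_files_to_copy : Int) : List Int :=
  if num_files_to_copy ≥ total_files then PySem.List.pyRange 0 total_files 1
  else if num_files_to_copy = 1 then [0]
  else
    let gaps := (PySem.List.pyRange 0 (num_files_to_copy - 2) 1).foldl
      (fun gaps _ => pvBStep gaps) [total_files - 1]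
    (gaps.foldl (fun p g => (p.1 ++ [p.2 + g], p.2 + g)) ([0], (0 : Int))).1

-- ===== PRECONDITION & SPEC =====
def Spec_get_max_interval_indices (total_files : Int) (num_files_to_copy : Int) (out : List Int) : Prop := out = get_max_interval_indices_alt total_files num_files_to_copy
instance (total_files : Int) (num_files_to_copy : Int) (out : List Int) : Decidable (Spec_get_max_interval_indices total_files num_files_to_copy out) := by unfold Spec_get_max_interval_indices; infer_instance

-- ===== CLAIM (what is proved, stated in full; the proofs are below) =====
def Claim_equal_get_max_interval_indices : Prop := ∀ (total_files : Int) (num_files_to_copy : Int), Dom_get_max_interval_indices total_files num_files_to_copy → Spec_get_max_interval_indices total_files num_files_to_copy (get_max_interval_indices total_files num_files_to_copy)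

-- ===== LEMMAS AND PROOFS =====

-- prefix sums of the gap list, starting (exclusively) after s
def pvSums (s : Int) : List Int → List Int
  | [] => []
  | g :: t => (s + g) :: pvSums (s + g) t

-- direct recursion computing A's first-strict-max scan over the gap list
def pvFirstMax : List Int → Int → Int × Int → Int × Int
  | [], _, st => st
  | g :: t, j, st => pvFirstMax t (j + 1) (if g > st.1 then (g, j) else st)

theorem pvSums_append (xs ys : List Int) (s : Int) :
    pvSums s (xs ++ ys) = pvSums s xs ++ pvSums (s + xs.sum) ys := by
  induction xs generalizing s with
  | nil => simp [pvSums]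
  | cons x t ih => simp [pvSums, ih, add_assoc]

theorem pvSums_length (s : Int) (gs : List Int) : (pvSums s gs).length = gs.length := by
  induction gs generalizing s with
  | nil => rfl
  | cons g t ih => simp [pvSums, ih]

theorem pvSums_getD (gs : List Int) (s : Int) (m : Nat) (hm : m ≤ gs.length) :
    (s :: pvSums s gs).getD m 0 = s + (gs.take m).sum := by
  induction gs generalizing s m with
  | nil =>
    simp only [List.length_nil, Nat.le_zero] at hm
    subst hm; simp
  | cons g t ih =>
    cases m with
    | zero => simp
    | succ m' =>
      have := ih (s + g) m' (by simpa using hm)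
      simpa [pvSums, add_assoc] using this

-- B's trailing prefix-sum pass is pvSums
theorem pvPass_eq (gs : List Int) (pre : List Int) (s : Int) :
    (gs.foldl (fun p g => (p.1 ++ [p.2 + g], p.2 + g)) (pre, s)).1 = pre ++ pvSums s gs := by
  induction gs generalizing pre s with
  | nil => simp [pvSums]
  | cons g t ih => simpa [pvSums] using (ih (pre ++ [s + g]) (s + g))

theorem pvIndex?_eq (l : List Int) (v : Int) (h : v ∈ l) :
    PySem.List.index? l v = some (l.idxOf v) := by
  induction l with
  | nil => simp at h
  | cons x t ih =>
    by_cases hx : x = v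
    · subst hx; rw [PySem.List.index?_cons_self]; simp [List.idxOf_cons_self]
    · rw [PySem.List.index?_cons_of_ne t hx,
        ih (by rcases List.mem_cons.mp h with h' | h'; exact absurd h'.symm hx; exact h'),
        List.idxOf_cons_ne _ (by exact hx)]
      rfl

-- A's pyRange scan body equals pvFirstMax on the gap list
theorem pvAScan_core (gs : List Int) (xs : List Int) (j : Nat) (st : Int × Int)
    (hlen : xs.length = j + 1 + gs.length)
    (hgap : ∀ m : Nat, m < gs.length →
      PySem.List.pyGetD xs ((j : Int) + 1 + m) 0 - PySem.List.pyGetD xs ((j : Int) + m) 0 = gs.getD m 0) :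
    (PySem.List.pyRange ((j : Int) + 1) (xs.length : Int) 1).foldl
      (fun st i =>
        let gap := PySem.List.pyGetD xs i 0 - PySem.List.pyGetD xs (i - 1) 0
        if gap > st.1 then (gap, i) else st) st
      = pvFirstMax gs ((j : Int) + 1) st := by
  induction gs generalizing j st with
  | nil =>
    simp only [List.length_nil, Nat.add_zero] at hlen
    rw [PySem.List.pyRange_one_eq_nil (by omega)]
    rfl
  | cons g t ih =>
    simp only [List.length_cons] at hlen
    rw [PySem.List.pyRange_one_cons (by omega)]
    simp only [List.foldl_cons]
    have h0 := hgap 0 (Nat.succ_pos _)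
    simp only [Nat.cast_zero, add_zero, List.getD_cons_zero] at h0
    have hsub : ((j : Int) + 1 - 1) = (j : Int) := by ring
    rw [show pvFirstMax (g :: t) ((j : Int) + 1) st
        = pvFirstMax t ((j : Int) + 1 + 1) (if g > st.1 then (g, (j : Int) + 1) else st) from rfl]
    have ih' := ih (j + 1) (if g > st.1 then (g, (j : Int) + 1) else st)
      (by omega)
      (by
        intro m hm
        have h := hgap (m + 1) (Nat.succ_lt_succ hm)
        push_cast at h ⊢
        rw [List.getD_cons_succ] at h
        rw [show (j : Int) + 1 + 1 + m = (j : Int) + 1 + (m + 1) by ring,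
          show (j : Int) + 1 + m = (j : Int) + (m + 1) by ring]
        exact h)
    push_cast at ih'
    simp only [hsub, h0]
    exact ih'

theorem pvAScan_eq (gs : List Int) :
    pvAScan (0 :: pvSums 0 gs) = pvFirstMax gs 1 (0, 1) := by
  have hcore := pvAScan_core gs (0 :: pvSums 0 gs) 0 (0, 1)
    (by simp [pvSums_length]; omega)
    (by
      intro m hm
      have h1 : ((0 : Nat) : Int) + 1 + (m : Int) = ((m + 1 : Nat) : Int) := by push_cast; ring
      have h2 : ((0 : Nat) : Int) + (m : Int) = ((m : Nat) : Int) := by push_cast; ring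
      rw [h1, h2, PySem.List.pyGetD_natCast, PySem.List.pyGetD_natCast]
      rw [pvSums_getD gs 0 (m + 1) (by omega), pvSums_getD gs 0 m (by omega),
        List.getD_eq_getElem gs 0 hm]
      have hsum : (List.take (m + 1) gs).sum = (List.take m gs).sum + gs[m] :=
        List.sum_take_succ gs m hm
      simp only [zero_add]
      omega)
  simpa using hcore

-- pvFirstMax does not move when nothing beats st
theorem pvFirstMax_no_improve (t : List Int) (j : Int) (st : Int × Int)
    (h : ∀ y ∈ t, y ≤ st.1) : pvFirstMax t j st = st := by
  induction t generalizing j with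
  | nil => rfl
  | cons g r ih =>
    have hg : ¬ g > st.1 := by simpa using h g (by simp)
    simp only [pvFirstMax, if_neg hg]
    exact ih (j + 1) (fun y hy => h y (by simp [hy]))

-- pvFirstMax finds the first occurrence of the maximum
theorem pvFirstMax_eq (gs : List Int) (M : Int) (j : Int) (st : Int × Int)
    (hmem : M ∈ gs) (hub : ∀ y ∈ gs, y ≤ M) (hlt : st.1 < M) :
    pvFirstMax gs j st = (M, j + (gs.idxOf M : Int)) := by
  induction gs generalizing j st with
  | nil => simp at hmem
  | cons g t ih =>
    by_cases hg : g = M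
    · subst hg
      simp only [pvFirstMax, if_pos hlt]
      rw [pvFirstMax_no_improve t (j + 1) (g, j) (fun y hy => hub y (by simp [hy]))]
      simp [List.idxOf_cons_self]
    · have hgM : g < M := lt_of_le_of_ne (hub g (by simp)) hg
      have hmem' : M ∈ t := by
        rcases List.mem_cons.mp hmem with h | h
        · exact absurd h.symm hg
        · exact h
      simp only [pvFirstMax]
      have hidx : (((g :: t).idxOf M : Nat) : Int) = ((t.idxOf M : Nat) : Int) + 1 := by
        rw [List.idxOf_cons_ne _ (by exact hg)]
        push_cast; ring
      by_cases hc : g > st.1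
      · rw [if_pos hc, ih (j + 1) (g, j) hmem' (fun y hy => hub y (by simp [hy])) hgM, hidx]
        rw [Prod.mk.injEq]; constructor; rfl; ring
      · rw [if_neg hc, ih (j + 1) st hmem' (fun y hy => hub y (by simp [hy])) hlt, hidx]
        rw [Prod.mk.injEq]; constructor; rfl; ring

-- the decomposition pvBStep actually computes, on a nonempty list
theorem pvBStep_decomp (gs : List Int) (hne : gs ≠ []) :
    ∃ (M : Int), M ∈ gs ∧ (∀ y ∈ gs, y ≤ M) ∧
      gs = gs.take (gs.idxOf M) ++ M :: gs.drop (gs.idxOf M + 1) ∧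
      pvBStep gs = gs.take (gs.idxOf M) ++
        PySem.Int.floordiv M 2 :: (M - PySem.Int.floordiv M 2) :: gs.drop (gs.idxOf M + 1) := by
  obtain ⟨x, t, rfl⟩ : ∃ x t, gs = x :: t := by
    cases gs with
    | nil => exact absurd rfl hne
    | cons x t => exact ⟨x, t, rfl⟩
  refine ⟨t.foldl max x, ?_, ?_, ?_, ?_⟩
  · rcases PySem.List.foldl_max_mem t x with h | h
    · rw [h]; simp
    · simp [h]
  · intro y hy
    rcases List.mem_cons.mp hy with h | h
    · rw [h]; exact (PySem.List.le_foldl_max t x).1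
    · exact (PySem.List.le_foldl_max t x).2 y h
  · have hmem : t.foldl max x ∈ x :: t := by
      rcases PySem.List.foldl_max_mem t x with h | h
      · rw [h]; simp
      · simp [h]
    have hi : (x :: t).idxOf (t.foldl max x) < (x :: t).length := List.idxOf_lt_length_of_mem hmem
    conv_lhs => rw [← List.take_append_drop ((x :: t).idxOf (t.foldl max x)) (x :: t)]
    rw [List.drop_eq_getElem_cons hi, List.getElem_idxOf hi]
  · have hmem : t.foldl max x ∈ x :: t := by
      rcases PySem.List.foldl_max_mem t x with h | h
      · rw [h]; simp
      · simp [h]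
    rw [pvBStep]
    rw [PySem.List.max?_id_cons, Option.getD_some, pvIndex?_eq _ _ hmem, Option.getD_some]

theorem pvStep_sums (gs : List Int) (hne : gs ≠ []) (hpos : ∀ g ∈ gs, 1 ≤ g) :
    pvAStep (0 :: pvSums 0 gs) = 0 :: pvSums 0 (pvBStep gs) := by
  obtain ⟨M, hmem, hub, hdec, hstep⟩ := pvBStep_decomp gs hne
  set i := gs.idxOf M with hidef
  have hi : i < gs.length := List.idxOf_lt_length_of_mem hmem
  set u := gs.take i with hu
  set rest := gs.drop (i + 1) with hrest
  set S : Int := u.sum with hS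
  set a : Int := PySem.Int.floordiv M 2 with ha
  have hM1 : 1 ≤ M := hpos M hmem
  have hulen : u.length = i := by rw [hu]; exact List.length_take_of_le (le_of_lt hi)
  -- A's scan returns (M, 1 + i)
  have hscan : pvAScan (0 :: pvSums 0 gs) = (M, 1 + (i : Int)) := by
    rw [pvAScan_eq gs, pvFirstMax_eq gs M 1 (0, 1) hmem hub (by simpa using hM1)]
  -- the two reads of A's step
  have hxlen : (0 :: pvSums 0 gs).length = gs.length + 1 := by simp [pvSums_length]
  have hread1 : PySem.List.pyGetD (0 :: pvSums 0 gs) ((1 : Int) + i - 1) 0 = S := by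
    rw [show (1 : Int) + i - 1 = ((i : Nat) : Int) by ring, PySem.List.pyGetD_natCast]
    rw [pvSums_getD gs 0 i (le_of_lt hi)]
    simp [hS, hu]
  have htakesucc : (gs.take (i + 1)).sum = S + M := by
    have hgi : gs[i] = M := List.getElem_idxOf hi
    rw [List.sum_take_succ gs i hi, hgi]
  have hread2 : PySem.List.pyGetD (0 :: pvSums 0 gs) ((1 : Int) + i) 0 = S + M := by
    rw [show (1 : Int) + i = ((i + 1 : Nat) : Int) by push_cast; ring, PySem.List.pyGetD_natCast]
    rw [pvSums_getD gs 0 (i + 1) (by omega), htakesucc]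
    ring
  -- the inserted midpoint
  have hmid : PySem.Int.floordiv (S + (S + M)) 2 = S + a := by
    rw [ha, PySem.Int.floordiv_eq_ediv_of_pos (by norm_num),
      PySem.Int.floordiv_eq_ediv_of_pos (by norm_num)]
    rw [show S + (S + M) = M + S * 2 by ring, Int.add_mul_ediv_right _ _ (by norm_num)]
    ring
  -- expand pvSums along the decomposition of gs
  have hsums : pvSums 0 gs = pvSums 0 u ++ (S + M) :: pvSums (S + M) rest := by
    conv_lhs => rw [hdec]
    rw [pvSums_append]
    simp [pvSums, hS]
  have hulen' : (pvSums 0 u).length = i := by rw [pvSums_length]; exact hulen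
  -- compute A's step
  rw [pvAStep, hscan]
  simp only
  rw [hread1, hread2, hmid]
  rw [show (1 : Int) + i = ((i + 1 : Nat) : Int) by push_cast; ring]
  rw [PySem.List.insert_natCast _ _ _ (by omega)]
  rw [hsums, List.take_succ_cons, List.drop_succ_cons,
    List.take_left' hulen', List.drop_left' hulen', hstep, pvSums_append]
  simp only [pvSums, zero_add, List.cons_append]
  rw [← hS]
  rw [show S + a + (M - a) = S + M by ring]

-- pvBStep preserves the loop invariant
theorem pvBStep_facts (gs : List Int) (hne : gs ≠ []) (hpos : ∀ g ∈ gs, 1 ≤ g)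
    (hbig : (gs.length : Int) + 1 ≤ gs.sum) :
    pvBStep gs ≠ [] ∧ (∀ g ∈ pvBStep gs, 1 ≤ g) ∧
      (pvBStep gs).sum = gs.sum ∧ ((pvBStep gs).length : Int) = (gs.length : Int) + 1 := by
  obtain ⟨M, hmem, hub, hdec, hstep⟩ := pvBStep_decomp gs hne
  have hM2 : 2 ≤ M := by
    by_contra hM
    rw [Int.not_le] at hM
    have hall : ∀ x ∈ gs, x ≤ (1 : Int) := fun x hx => le_trans (hub x hx) (by omega)
    have := List.sum_le_card_nsmul gs 1 hall
    simp only [nsmul_eq_mul, mul_one] at this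
    omega
  have hfd : PySem.Int.floordiv M 2 = M / 2 := PySem.Int.floordiv_eq_ediv_of_pos (by norm_num)
  have ha1 : 1 ≤ PySem.Int.floordiv M 2 := by rw [hfd]; omega
  have hb1 : 1 ≤ M - PySem.Int.floordiv M 2 := by rw [hfd]; omega
  refine ⟨by simp [hstep], ?_, ?_, ?_⟩
  · intro g hg
    rw [hstep] at hg
    rcases List.mem_append.mp hg with h | h
    · exact hpos g (by rw [hdec]; exact List.mem_append.mpr (Or.inl h))
    · rcases List.mem_cons.mp h with h' | h'
      · omega
      · rcases List.mem_cons.mp h' with h'' | h''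
        · omega
        · exact hpos g (by rw [hdec]; exact List.mem_append.mpr (Or.inr (List.mem_cons.mpr (Or.inr h''))))
  · rw [hstep]
    conv_rhs => rw [hdec]
    simp only [List.sum_append, List.sum_cons]
    ring
  · rw [hstep]
    have : gs.length = (gs.take (gs.idxOf M)).length + ((M : Int) :: gs.drop (gs.idxOf M + 1)).length := by
      conv_lhs => rw [hdec]
      simp
    simp only [List.length_append, List.length_cons] at this ⊢
    push_cast
    omega

theorem pvMain_fold (r : List Int) (gs : List Int) (hne : gs ≠ [])
    (hpos : ∀ g ∈ gs, 1 ≤ g) (hbound : (gs.length : Int) + r.length ≤ gs.sum) :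
    r.foldl (fun indices _ => pvAStep indices) (0 :: pvSums 0 gs)
      = 0 :: pvSums 0 (r.foldl (fun gaps _ => pvBStep gaps) gs) := by
  induction r generalizing gs with
  | nil => rfl
  | cons _ r ih =>
    simp only [List.foldl_cons]
    rw [pvStep_sums gs hne hpos]
    have hbig : (gs.length : Int) + 1 ≤ gs.sum := by
      simp only [List.length_cons] at hbound
      push_cast at hbound
      omega
    obtain ⟨hne', hpos', hsum', hlen'⟩ := pvBStep_facts gs hne hpos hbig
    apply ih (pvBStep gs) hne' hpos'
    rw [hsum', hlen']
    simp only [List.length_cons] at hbound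
    push_cast at hbound ⊢
    omega

-- ===== VERDICT (by name: the statement is the Claim_ definition above) =====
theorem get_max_interval_indices_spec : Claim_equal_get_max_interval_indices := by
  intro n k _
  unfold Spec_get_max_interval_indices get_max_interval_indices get_max_interval_indices_alt
  by_cases h1 : k ≥ n
  · simp [h1]
  · rw [if_neg h1, if_neg h1]
    by_cases h2 : k = 1
    · simp [h2]
    · rw [if_neg h2, if_neg h2]
      simp only
      rw [pvPass_eq]
      by_cases h3 : k - 2 ≤ 0
      · rw [PySem.List.pyRange_one_eq_nil (by omega)]
        simp [pvSums]
      · have hk3 : 3 ≤ k := by omega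
        have hn : k + 1 ≤ n := by omega
        have hlenr : ((PySem.List.pyRange 0 (k - 2) 1).length : Int) = k - 2 := by
          rw [PySem.List.length_pyRange_one]
          omega
        have hmain := pvMain_fold (PySem.List.pyRange 0 (k - 2) 1) [n - 1]
          (by simp)
          (by intro g hg; simp at hg; omega)
          (by simp only [List.length_cons, List.length_nil, List.sum_cons, List.sum_nil]
              rw [hlenr]
              push_cast
              omega)
        rw [show ([0, n - 1] : List Int) = 0 :: pvSums 0 [n - 1] by simp [pvSums]]
        rw [hmain]
        rfl
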